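-- pv_equiv track=rewrite | github.com/sgbett/runar | packages/runar-py/runar/sdk/provider.py | _mock_hash64
-- ===== SOURCE A (Python) =====
-- def _mock_hash64(input_str: str) -> str:
--     """Deterministic mock hash producing a 64-char hex string (like a txid)."""
--     h0 = 0x6A09E667
--     h1 = 0xBB67AE85
--     h2 = 0x3C6EF372
--     h3 = 0xA54FF53A
--
--     mask32 = 0xFFFFFFFF
--
--     for ch in input_str:
--         c = ord(ch)
--         h0 = ((h0 ^ c) * 0x01000193) & mask32
--         h1 = ((h1 ^ c) * 0x01000193) & mask32
--         h2 = ((h2 ^ c) * 0x01000193) & mask32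
--         h3 = ((h3 ^ c) * 0x01000193) & mask32
--
--     parts = [h0, h1, h2, h3, h0 ^ h2, h1 ^ h3, h0 ^ h1, h2 ^ h3]
--     return ''.join(f'{p:08x}' for p in parts)
-- ===== SOURCE B (Python) =====
-- def _fnv32(seed, s):
--     h = seed
--     for ch in s:
--         h = ((h ^ ord(ch)) * 0x01000193) & 0xFFFFFFFF
--     return h
--
--
-- def _mock_hash64(input_str: str) -> str:
--     """Deterministic mock hash producing a 64-char hex string (like a txid)."""
--     h0 = _fnv32(0x6A09E667, input_str)
--     h1 = _fnv32(0xBB67AE85, input_str)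
--     h2 = _fnv32(0x3C6EF372, input_str)
--     h3 = _fnv32(0xA54FF53A, input_str)
--     parts = [h0, h1, h2, h3, h0 ^ h2, h1 ^ h3, h0 ^ h1, h2 ^ h3]
--     return ''.join(f'{p:08x}' for p in parts)
-- ===== Notes on version B (the rewrite author's own statement) =====
-- stated objective: alternative
-- what changed: A updates all four 32-bit lanes together in one interleaved pass with a 4-tuple of loop state; B factors out a single-seed FNV-1 scan helper and calls it once per seed (four independent passes over the string), then assembles the same parts list.
import Mathlib
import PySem

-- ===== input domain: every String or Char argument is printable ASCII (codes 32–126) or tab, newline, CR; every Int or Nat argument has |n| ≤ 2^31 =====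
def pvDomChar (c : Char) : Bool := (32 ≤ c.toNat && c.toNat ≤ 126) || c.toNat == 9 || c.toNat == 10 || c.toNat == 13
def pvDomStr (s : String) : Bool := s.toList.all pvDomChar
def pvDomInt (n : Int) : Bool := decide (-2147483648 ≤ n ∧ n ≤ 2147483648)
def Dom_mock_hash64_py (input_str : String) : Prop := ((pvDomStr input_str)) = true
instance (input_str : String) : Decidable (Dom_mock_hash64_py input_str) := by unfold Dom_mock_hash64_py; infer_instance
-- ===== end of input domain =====

-- B restructures A's single interleaved four-lane loop into a reusable one-seed FNV scan called four times (objective: alternative decomposition).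

-- shared hex formatting: f'{p:08x}' for 0 ≤ p < 2^32 (both Pythons format identically)
def pvHexDigit (n : Nat) : Char := if n < 10 then Char.ofNat (48 + n) else Char.ofNat (87 + n)
def pvHex8 (p : Nat) : List Char :=
  [pvHexDigit (p / 16 ^ 7 % 16), pvHexDigit (p / 16 ^ 6 % 16), pvHexDigit (p / 16 ^ 5 % 16),
   pvHexDigit (p / 16 ^ 4 % 16), pvHexDigit (p / 16 ^ 3 % 16), pvHexDigit (p / 16 ^ 2 % 16),
   pvHexDigit (p / 16 % 16), pvHexDigit (p % 16)]

-- ===== PORT A =====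
def mock_hash64_py (input_str : String) : String :=
  let st := input_str.toList.foldl
    (fun (st : Nat × Nat × Nat × Nat) ch =>
      let c := ch.toNat
      (((st.1 ^^^ c) * 0x01000193) &&& 0xFFFFFFFF,
       ((st.2.1 ^^^ c) * 0x01000193) &&& 0xFFFFFFFF,
       ((st.2.2.1 ^^^ c) * 0x01000193) &&& 0xFFFFFFFF,
       ((st.2.2.2 ^^^ c) * 0x01000193) &&& 0xFFFFFFFF))
    (0x6A09E667, 0xBB67AE85, 0x3C6EF372, 0xA54FF53A)
  let h0 := st.1
  let h1 := st.2.1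
  let h2 := st.2.2.1
  let h3 := st.2.2.2
  let parts := [h0, h1, h2, h3, h0 ^^^ h2, h1 ^^^ h3, h0 ^^^ h1, h2 ^^^ h3]
  String.mk (parts.flatMap pvHex8)

-- ===== PORT B =====
def pvFnv32 (seed : Nat) (s : String) : Nat :=
  s.toList.foldl (fun h ch => ((h ^^^ ch.toNat) * 0x01000193) &&& 0xFFFFFFFF) seed

def mock_hash64_py_alt (input_str : String) : String :=
  let h0 := pvFnv32 0x6A09E667 input_str
  let h1 := pvFnv32 0xBB67AE85 input_str
  let h2 := pvFnv32 0x3C6EF372 input_str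
  let h3 := pvFnv32 0xA54FF53A input_str
  let parts := [h0, h1, h2, h3, h0 ^^^ h2, h1 ^^^ h3, h0 ^^^ h1, h2 ^^^ h3]
  String.mk (parts.flatMap pvHex8)

-- ===== PRECONDITION & SPEC =====
def Spec_mock_hash64_py (input_str : String) (out : String) : Prop := out = mock_hash64_py_alt input_str
instance (input_str : String) (out : String) : Decidable (Spec_mock_hash64_py input_str out) := by unfold Spec_mock_hash64_py; infer_instance

-- ===== CLAIM (what is proved, stated in full; the proofs are below) =====
def Claim_equal_mock_hash64_py : Prop := ∀ (input_str : String), Dom_mock_hash64_py input_str → Spec_mock_hash64_py input_str (mock_hash64_py input_str)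

-- ===== LEMMAS AND PROOFS =====

-- an interleaved fold over a 4-tuple equals four independent folds
theorem pv_foldl_quad (f : Nat → Char → Nat) (l : List Char) :
    ∀ a b c d : Nat,
      l.foldl (fun (st : Nat × Nat × Nat × Nat) ch =>
          (f st.1 ch, f st.2.1 ch, f st.2.2.1 ch, f st.2.2.2 ch)) (a, b, c, d)
        = (l.foldl f a, l.foldl f b, l.foldl f c, l.foldl f d) := by
  induction l with
  | nil => intro a b c d; simp
  | cons x xs ih => intro a b c d; simpa using ih (f a x) (f b x) (f c x) (f d x)

-- ===== VERDICT (by name: the statement is the Claim_ definition above) =====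
theorem mock_hash64_py_spec : Claim_equal_mock_hash64_py := by
  intro s _
  unfold Spec_mock_hash64_py mock_hash64_py mock_hash64_py_alt pvFnv32
  simp only [pv_foldl_quad (fun h ch => ((h ^^^ ch.toNat) * 0x01000193) &&& 0xFFFFFFFF) s.toList]
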